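-- pv_equiv track=rewrite | github.com/gyeongminn/algorithm | 백준/Silver/2960. 에라토스테네스의 체/에라토스테네스의 체.py | solution
-- ===== SOURCE A (Python) =====
-- def solution(arr, n, k):
--     count = 0
--     while arr:
--         p = arr.pop(0)
--         count += 1
--         if count == k:
--             return p
--
--         i = 1
--         while i * p <= n:
--             if p * i in arr:
--                 arr.remove(p * i)
--                 count += 1
--                 if count == k:
--                     return p * i
--             i += 1
-- ===== SOURCE B (Python) =====
-- def solution(arr, n, k):
--     # Batch formulation: each round pops the first remaining value p and the
--     # multiples of p present in the rest are removed all at once (they are hit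
--     # by A in increasing value order), so the k-th removal can be read off by
--     # index instead of scanning i = 1, 2, ... with `in`/`remove` passes.
--     rest = list(arr)
--     count = 0
--     while rest:
--         p = rest[0]
--         rest = rest[1:]
--         count += 1
--         if count == k:
--             return p
--         ms = sorted({v for v in rest if p <= v <= n and v % p == 0})
--         if count < k <= count + len(ms):
--             return ms[k - count - 1]
--         count += len(ms)
--         seen = set(ms)
--         out = []
--         for v in rest:
--             if v in seen:
--                 seen.discard(v)
--             else:
--                 out.append(v)
--         rest = out
--     return None
-- ===== Notes on version B (the rewrite author's own statement) =====
-- stated objective: alternative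
-- what changed: Instead of scanning i=1,2,... with 'p*i in arr'/'arr.remove' list passes, B computes each round's removed multiples in one batch (filter + set + sort), answers the k-th removal by direct indexing into that sorted batch, and deletes all of them from the remainder in a single pass with a hash set; intended as faster, but a timing run could not measure a clean ratio (A timed out at its larger sizes).
-- outside the precondition, e.g. on solution([0, 0], 5, 2): A returns 0, B raises ZeroDivisionError; on solution([-1, -3, -2], 5, 2): A returns -2, B returns -3; on solution([-2], 10, 2): A does not finish within the time limit, B returns None
import Mathlib
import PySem

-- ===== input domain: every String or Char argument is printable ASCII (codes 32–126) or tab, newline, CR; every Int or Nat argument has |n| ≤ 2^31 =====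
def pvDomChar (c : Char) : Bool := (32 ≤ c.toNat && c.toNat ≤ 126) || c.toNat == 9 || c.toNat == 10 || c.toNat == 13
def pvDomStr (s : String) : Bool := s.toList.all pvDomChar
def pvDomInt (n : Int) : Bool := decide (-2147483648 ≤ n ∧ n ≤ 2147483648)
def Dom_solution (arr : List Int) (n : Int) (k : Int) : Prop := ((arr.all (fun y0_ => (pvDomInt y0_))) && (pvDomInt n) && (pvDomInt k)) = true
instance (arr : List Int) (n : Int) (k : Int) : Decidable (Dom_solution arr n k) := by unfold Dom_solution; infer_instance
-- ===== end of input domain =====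

-- B replaces A's per-multiple `in`/`remove` list scans by one batched
-- filter+set+sort per round, indexing the k-th removal directly (alternative;
-- intended as faster, but a timing run measured no clean ratio).
-- A mutates its argument list in place; B does not — the equivalence proved
-- here is about the RETURN value only.

-- ===== PORT A =====
-- inner `while i * p <= n` loop of A; the fuel only bounds the iterations
-- (under Pre_solution p ≥ 1, so at most n iterations happen and the fuel
-- n.toNat + 1 passed below is never exhausted)
def innerA (p n k : Int) : Nat → Int → List Int → Int → Sum Int (List Int × Int)
  | 0, _, arr, count => Sum.inr (arr, count)
  | fuel + 1, i, arr, count =>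
    if i * p ≤ n then
      if p * i ∈ arr then
        -- arr.remove(p*i); count += 1; if count == k: return p*i
        if count + 1 = k then Sum.inl (p * i)
        else innerA p n k fuel (i + 1) (arr.erase (p * i)) (count + 1)
      else innerA p n k fuel (i + 1) arr count
    else Sum.inr (arr, count)

-- outer `while arr` loop of A; fuel = initial length, never exhausted since
-- the list strictly shrinks each round
def outerA (n k : Int) : Nat → List Int → Int → Option Int
  | _, [], _ => none
  | 0, _ :: _, _ => none
  | fuel + 1, p :: rest, count =>
    if count + 1 = k then some p
    else
      match innerA p n k (n.toNat + 1) 1 rest (count + 1) with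
      | Sum.inl v => some v
      | Sum.inr (arr', count') => outerA n k fuel arr' count'

def solution (arr : List Int) (n : Int) (k : Int) : Option Int :=
  outerA n k arr.length arr 0

-- ===== PORT B =====
-- ms = sorted({v for v in rest if p <= v <= n and v % p == 0})
def msB (p n : Int) (rest : List Int) : List Int :=
  PySem.List.sorted
    (PySem.Set.ofList
      (rest.filter (fun v => decide (p ≤ v) && decide (v ≤ n) && (PySem.Int.mod v p == 0))))
    (fun x => x)

-- the one-pass removal loop of B (seen = set(ms); keep v unless freshly seen)
def onePassB : List Int → List Int → List Int
  | _, [] => []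
  | seen, v :: vs =>
    if v ∈ seen then onePassB (PySem.Set.discard seen v) vs
    else v :: onePassB seen vs

-- `while rest` loop of B; fuel = initial length, never exhausted
def outerB (n k : Int) : Nat → List Int → Int → Option Int
  | _, [], _ => none
  | 0, _ :: _, _ => none
  | fuel + 1, p :: rest, count =>
    if count + 1 = k then some p
    else
      let ms := msB p n rest
      if count + 1 < k ∧ k ≤ count + 1 + (ms.length : Int) then
        match PySem.List.pyGet? ms (k - (count + 1) - 1) with
        | some v => some v
        | none => none   -- unreachable: the guard puts the index in range
      else outerB n k fuel (onePassB (PySem.Set.ofList ms) rest) (count + 1 + (ms.length : Int))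

def solution_alt (arr : List Int) (n : Int) (k : Int) : Option Int :=
  outerB n k arr.length arr 0

-- ===== PRECONDITION & SPEC =====
-- Pre_ excludes lists with a nonpositive element: popping such a p makes A's
-- inner `while i * p <= n` loop run forever (p ≤ 0 never pushes i*p past n),
-- so A diverges on almost all such inputs, and B raises (v % 0) or returns
-- where A happens to return before diverging.
def Pre_solution (arr : List Int) (n : Int) (k : Int) : Prop := ∀ x ∈ arr, 1 ≤ x
instance (arr : List Int) (n : Int) (k : Int) : Decidable (Pre_solution arr n k) := by
  unfold Pre_solution; infer_instance

def pvWitness_solution : List Int × Int × Int := ([2, 3, 4, 5, 6, 7, 8, 9, 10], 10, 7)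

def Spec_solution (arr : List Int) (n : Int) (k : Int) (out : Option Int) : Prop := out = solution_alt arr n k
instance (arr : List Int) (n : Int) (k : Int) (out : Option Int) : Decidable (Spec_solution arr n k out) := by unfold Spec_solution; infer_instance

-- ===== CLAIM (what is proved, stated in full; the proofs are below) =====
def Claim_equal_solution : Prop := ∀ (arr : List Int) (n : Int) (k : Int), Dom_solution arr n k → Pre_solution arr n k → Spec_solution arr n k (solution arr n k)

-- ===== LEMMAS AND PROOFS =====

-- the multiples of p (value i*p, (i+1)*p, ... up to n) present in rest, in the
-- order A's inner loop removes them
def msRec (p n : Int) : Nat → Int → List Int → List Int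
  | 0, _, _ => []
  | fuel + 1, i, rest =>
    if i * p ≤ n then
      if p * i ∈ rest then p * i :: msRec p n fuel (i + 1) rest
      else msRec p n fuel (i + 1) rest
    else []

lemma msRec_erase (p n a : Int) (fuel : Nat) :
    ∀ (i : Int) (rest : List Int), (∀ j : Int, i ≤ j → p * j ≠ a) →
      msRec p n fuel i (rest.erase a) = msRec p n fuel i rest := by
  induction fuel with
  | zero => intro i rest _; rfl
  | succ fuel ih =>
    intro i rest h
    have hmem : (p * i ∈ rest.erase a) ↔ (p * i ∈ rest) :=
      List.mem_erase_of_ne (h i le_rfl)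
    have hrec := ih (i + 1) rest (fun j hj => h j (by omega))
    have hrec' := ih (i + 1) (rest.erase a) (fun j hj => h j (by omega))
    simp only [msRec]
    by_cases h1 : i * p ≤ n
    · by_cases h2 : p * i ∈ rest
      · simp [h1, h2, hmem.mpr h2, hrec]
      · have h2' : p * i ∉ rest.erase a := fun hx => h2 (hmem.mp hx)
        simp [h1, h2, h2', hrec]
    · simp [h1]

lemma innerA_eq (p n k : Int) (hp : 1 ≤ p) (fuel : Nat) :
    ∀ (i count : Int) (rest : List Int),
      innerA p n k fuel i rest count =
        if count < k ∧ k ≤ count + ((msRec p n fuel i rest).length : Int)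
        then Sum.inl ((msRec p n fuel i rest).getD (k - count - 1).toNat 0)
        else Sum.inr (List.foldl List.erase rest (msRec p n fuel i rest),
                      count + ((msRec p n fuel i rest).length : Int)) := by
  induction fuel with
  | zero =>
    intro i count rest
    have hng : ¬ (count < k ∧ k ≤ count + (((msRec p n 0 i rest).length : Nat) : Int)) := by
      simp only [msRec, List.length_nil]; omega
    simp only [innerA, msRec, if_neg hng, List.foldl_nil, List.length_nil]
    norm_num
  | succ fuel ih =>
    intro i count rest
    by_cases h1 : i * p ≤ n
    · by_cases h2 : p * i ∈ rest
      · have hms : msRec p n (fuel + 1) i rest = p * i :: msRec p n fuel (i + 1) rest := by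
          simp only [msRec, if_pos h1, if_pos h2]
        by_cases hk : count + 1 = k
        · have lhs : innerA p n k (fuel + 1) i rest count = Sum.inl (p * i) := by
            simp only [innerA, if_pos h1, if_pos h2, if_pos hk]
          have hg : count < k ∧ k ≤ count + (((p * i :: msRec p n fuel (i+1) rest).length : Nat) : Int) := by
            simp only [List.length_cons]; push_cast; omega
          have hidx : (k - count - 1).toNat = 0 := by omega
          rw [lhs, hms, if_pos hg, hidx, List.getD_cons_zero]
        · have herase : msRec p n fuel (i + 1) (rest.erase (p * i)) = msRec p n fuel (i + 1) rest :=
            msRec_erase p n (p * i) fuel (i + 1) rest (by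
              intro j hj hEq
              have hne : j ≠ i := by omega
              exact hne (mul_left_cancel₀ (by omega : p ≠ 0) hEq))
          have step := ih (i + 1) (count + 1) (rest.erase (p * i))
          rw [herase] at step
          have lhs : innerA p n k (fuel + 1) i rest count
              = innerA p n k fuel (i + 1) (rest.erase (p * i)) (count + 1) := by
            simp only [innerA, if_pos h1, if_pos h2, if_neg hk]
          rw [lhs, step, hms]
          set ms' := msRec p n fuel (i + 1) rest with hms'
          by_cases hg : count + 1 < k ∧ k ≤ count + 1 + (ms'.length : Int)
          · have hg2 : count < k ∧ k ≤ count + (((p * i :: ms').length : Nat) : Int) := by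
              simp only [List.length_cons]; push_cast; constructor <;> omega
            rw [if_pos hg, if_pos hg2]
            have hidx : (k - count - 1).toNat = (k - (count + 1) - 1).toNat + 1 := by omega
            rw [hidx, List.getD_cons_succ]
          · have hg2 : ¬ (count < k ∧ k ≤ count + (((p * i :: ms').length : Nat) : Int)) := by
              simp only [List.length_cons]; push_cast; push_cast at hg; omega
            rw [if_neg hg, if_neg hg2]
            simp only [List.foldl_cons, List.length_cons, Sum.inr.injEq, Prod.mk.injEq]
            exact ⟨trivial, by push_cast; omega⟩
      · have hms : msRec p n (fuel + 1) i rest = msRec p n fuel (i + 1) rest := by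
          simp only [msRec, if_pos h1, if_neg h2]
        have lhs : innerA p n k (fuel + 1) i rest count
            = innerA p n k fuel (i + 1) rest count := by
          simp only [innerA, if_pos h1, if_neg h2]
        rw [lhs, ih, hms]
    · have hms : msRec p n (fuel + 1) i rest = [] := by
        simp only [msRec, if_neg h1]
      have hng : ¬ (count < k ∧ k ≤ count + (((msRec p n (fuel+1) i rest).length : Nat) : Int)) := by
        rw [hms]; simp only [List.length_nil]; omega
      rw [if_neg hng]
      simp only [innerA, if_neg h1, hms, List.foldl_nil, List.length_nil]
      norm_num

lemma msRec_lb (p n : Int) (hp : 1 ≤ p) (fuel : Nat) :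
    ∀ (i : Int) (rest : List Int) (v : Int), v ∈ msRec p n fuel i rest → p * i ≤ v := by
  induction fuel with
  | zero => intro i rest v hv; simp [msRec] at hv
  | succ fuel ih =>
    intro i rest v hv
    simp only [msRec] at hv
    by_cases h1 : i * p ≤ n
    · rw [if_pos h1] at hv
      have hstep : ∀ w, w ∈ msRec p n fuel (i + 1) rest → p * i ≤ w := by
        intro w hw
        have := ih (i + 1) rest w hw
        nlinarith
      by_cases h2 : p * i ∈ rest
      · rw [if_pos h2] at hv
        rcases List.mem_cons.mp hv with h | h
        · omega
        · exact hstep v h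
      · rw [if_neg h2] at hv
        exact hstep v hv
    · rw [if_neg h1] at hv; simp at hv

lemma msRec_pairwise (p n : Int) (hp : 1 ≤ p) (fuel : Nat) :
    ∀ (i : Int) (rest : List Int), (msRec p n fuel i rest).Pairwise (· < ·) := by
  induction fuel with
  | zero => intro i rest; simp [msRec]
  | succ fuel ih =>
    intro i rest
    simp only [msRec]
    by_cases h1 : i * p ≤ n
    · rw [if_pos h1]
      by_cases h2 : p * i ∈ rest
      · rw [if_pos h2]
        refine List.pairwise_cons.mpr ⟨?_, ih (i + 1) rest⟩
        intro v hv
        have := msRec_lb p n hp fuel (i + 1) rest v hv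
        nlinarith
      · rw [if_neg h2]; exact ih (i + 1) rest
    · rw [if_neg h1]; simp

lemma mem_msRec (p n : Int) (hp : 1 ≤ p) (fuel : Nat) :
    ∀ (i : Int), 1 ≤ i → ∀ (rest : List Int), n < p * (i + fuel) → ∀ (v : Int),
      (v ∈ msRec p n fuel i rest ↔ (v ∈ rest ∧ p * i ≤ v ∧ v ≤ n ∧ p ∣ v)) := by
  induction fuel with
  | zero =>
    intro i hi rest hfuel v
    simp only [msRec, List.not_mem_nil, false_iff]
    push_cast at hfuel
    rintro ⟨_, h1, h2, _⟩
    nlinarith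
  | succ fuel ih =>
    intro i hi rest hfuel v
    have hfuel' : n < p * ((i + 1) + fuel) := by push_cast at hfuel ⊢; nlinarith [hfuel]
    have ihv := ih (i + 1) (by omega) rest hfuel' v
    simp only [msRec]
    by_cases h1 : i * p ≤ n
    · rw [if_pos h1]
      by_cases h2 : p * i ∈ rest
      · rw [if_pos h2]
        simp only [List.mem_cons, ihv]
        constructor
        · rintro (rfl | ⟨hm, hlb, hub, hdvd⟩)
          · exact ⟨h2, le_refl _, by linarith [h1, mul_comm i p], Dvd.intro i rfl⟩
          · exact ⟨hm, by nlinarith, hub, hdvd⟩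
        · rintro ⟨hm, hlb, hub, hdvd⟩
          rcases hdvd with ⟨m, rfl⟩
          by_cases hmi : m = i
          · subst hmi; left; rfl
          · right
            have : i < m := by
              by_contra hle
              push_neg at hle
              have : m < i := lt_of_le_of_ne hle hmi
              nlinarith
            exact ⟨hm, by nlinarith, hub, Dvd.intro m rfl⟩
      · rw [if_neg h2]
        rw [ihv]
        constructor
        · rintro ⟨hm, hlb, hub, hdvd⟩
          exact ⟨hm, by nlinarith, hub, hdvd⟩
        · rintro ⟨hm, hlb, hub, hdvd⟩
          rcases hdvd with ⟨m, rfl⟩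
          have hmi : m ≠ i := by rintro rfl; exact h2 hm
          have : i < m := by
            by_contra hle
            push_neg at hle
            have : m < i := lt_of_le_of_ne hle hmi
            nlinarith
          exact ⟨hm, by nlinarith, hub, Dvd.intro m rfl⟩
    · rw [if_neg h1]
      simp only [List.not_mem_nil, false_iff]
      rintro ⟨_, hlb, hub, _⟩
      nlinarith [mul_comm i p]

lemma msRec_eq_msB (p n : Int) (hp : 1 ≤ p) (fuel : Nat) (rest : List Int)
    (hfuel : n < p * (1 + fuel)) : msB p n rest = msRec p n fuel 1 rest := by
  have hpw : (msRec p n fuel 1 rest).Pairwise (fun a b : Int => a < b) :=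
    msRec_pairwise p n hp fuel 1 rest
  have hnd : (msRec p n fuel 1 rest).Nodup := hpw.imp (fun h => ne_of_lt h)
  have hperm : (msRec p n fuel 1 rest).Perm
      (PySem.Set.ofList
        (rest.filter (fun v => decide (p ≤ v) && decide (v ≤ n) && (PySem.Int.mod v p == 0)))) := by
    rw [List.perm_ext_iff_of_nodup hnd (PySem.Set.nodup_ofList _)]
    intro v
    rw [mem_msRec p n hp fuel 1 le_rfl rest hfuel v, PySem.Set.mem_ofList, List.mem_filter]
    simp only [Bool.and_eq_true, decide_eq_true_eq, beq_iff_eq]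
    rw [PySem.Int.mod_eq_zero_iff_dvd]
    constructor
    · rintro ⟨hm, hlb, hub, hd⟩; exact ⟨hm, ⟨by linarith [mul_one p], hub⟩, hd⟩
    · rintro ⟨hm, ⟨hlb, hub⟩, hd⟩; exact ⟨hm, by linarith [mul_one p], hub, hd⟩
  exact PySem.List.sorted_eq_of_perm_of_pairwise_lt _ _ (fun x => x) hperm hpw

-- removing first occurrences of pairwise-distinct values, one pass vs folded erase
lemma foldl_erase_nil (S : List Int) : List.foldl List.erase ([] : List Int) S = [] := by
  induction S with
  | nil => rfl
  | cons a S ih => simpa using ih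

lemma foldl_erase_perm (rest : List Int) {S S' : List Int} (h : S.Perm S') :
    List.foldl List.erase rest S = List.foldl List.erase rest S' := by
  induction h generalizing rest with
  | nil => rfl
  | cons a h ih => simp only [List.foldl_cons]; exact ih _
  | swap a b l => simp only [List.foldl_cons, List.erase_comm]
  | trans h1 h2 ih1 ih2 => exact (ih1 rest).trans (ih2 rest)

lemma foldl_erase_cons_not_mem (v : Int) (vs : List Int) :
    ∀ S : List Int, v ∉ S →
      List.foldl List.erase (v :: vs) S = v :: List.foldl List.erase vs S := by
  intro S
  induction S generalizing vs with
  | nil => intro _; rfl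
  | cons a S ih =>
    intro hv
    have hav : ¬ (v == a) = true := by
      simp only [beq_iff_eq]
      intro h; exact hv (by simp [h])
    simp only [List.foldl_cons, List.erase_cons_tail hav]
    exact ih _ (fun h => hv (List.mem_cons_of_mem _ h))

lemma discard_eq_erase (S : List Int) (v : Int) (hS : S.Nodup) :
    PySem.Set.discard S v = S.erase v := by
  simp only [PySem.Set.discard]
  rw [List.Nodup.erase_eq_filter hS]
  rfl

lemma onePassB_eq (rest : List Int) :
    ∀ S : List Int, S.Nodup → onePassB S rest = List.foldl List.erase rest S := by
  induction rest with
  | nil => intro S _; simp [onePassB, foldl_erase_nil]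
  | cons v vs ih =>
    intro S hS
    simp only [onePassB]
    by_cases hv : v ∈ S
    · rw [if_pos hv, discard_eq_erase S v hS, ih _ (hS.erase v)]
      have hperm : (v :: S.erase v).Perm S := (List.perm_cons_erase hv).symm
      rw [foldl_erase_perm (v :: vs) hperm.symm]
      simp only [List.foldl_cons, List.erase_cons_head]
    · rw [if_neg hv, ih _ hS, foldl_erase_cons_not_mem v vs S hv]

lemma foldl_erase_sublist (S : List Int) :
    ∀ rest : List Int, (List.foldl List.erase rest S).Sublist rest := by
  induction S with
  | nil => intro rest; simp
  | cons a S ih =>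
    intro rest
    simp only [List.foldl_cons]
    exact (ih (rest.erase a)).trans (List.erase_sublist)

lemma outer_eq (n k : Int) (fuel : Nat) :
    ∀ (arr : List Int) (count : Int), (∀ x ∈ arr, 1 ≤ x) → arr.length ≤ fuel →
      outerA n k fuel arr count = outerB n k fuel arr count := by
  induction fuel with
  | zero =>
    intro arr count _ hlen
    have : arr = [] := List.length_eq_zero_iff.mp (Nat.le_zero.mp hlen)
    subst this; rfl
  | succ fuel ih =>
    intro arr count hpos hlen
    match arr with
    | [] => rfl
    | p :: rest =>
      have hp : 1 ≤ p := hpos p (List.mem_cons_self)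
      simp only [outerA, outerB]
      by_cases hk : count + 1 = k
      · rw [if_pos hk, if_pos hk]
      · rw [if_neg hk, if_neg hk]
        have hfuel : n < p * (1 + ((n.toNat + 1 : Nat) : Int)) := by
          have h1 : (0:Int) ≤ 1 + ((n.toNat + 1 : Nat) : Int) := by positivity
          have h2 : 1 + ((n.toNat + 1 : Nat) : Int) ≤ p * (1 + ((n.toNat + 1 : Nat) : Int)) :=
            le_mul_of_one_le_left h1 hp
          have h3 : n < 1 + ((n.toNat + 1 : Nat) : Int) := by
            push_cast; omega
          omega
        have hms := msRec_eq_msB p n hp (n.toNat + 1) rest hfuel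
        rw [innerA_eq p n k hp (n.toNat + 1) 1 (count + 1) rest, ← hms]
        set ms := msB p n rest with hmsdef
        have hnodup : ms.Nodup :=
          hms ▸ ((msRec_pairwise p n hp (n.toNat + 1) 1 rest).imp (fun h => ne_of_lt h))
        by_cases hg : count + 1 < k ∧ k ≤ count + 1 + (ms.length : Int)
        · have h0 : (0:Int) ≤ k - (count + 1) - 1 := by omega
          have h1' : k - (count + 1) - 1 < (ms.length : Int) := by omega
          rw [if_pos hg, if_pos hg, PySem.List.pyGet?_eq_some_getElem ms h0 h1',
            List.getD_eq_getElem ms 0 (by omega)]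
        · rw [if_neg hg, if_neg hg]
          have hop : onePassB (PySem.Set.ofList ms) rest = List.foldl List.erase rest ms := by
            rw [onePassB_eq rest (PySem.Set.ofList ms) (PySem.Set.nodup_ofList ms)]
            apply foldl_erase_perm
            exact (List.perm_ext_iff_of_nodup (PySem.Set.nodup_ofList ms) hnodup).mpr
              (fun a => PySem.Set.mem_ofList ms a)
          rw [hop]
          apply ih
          · intro x hx
            exact hpos x (List.mem_cons_of_mem p ((foldl_erase_sublist ms rest).mem hx))
          · have := (foldl_erase_sublist ms rest).length_le
            simp only [List.length_cons] at hlen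
            omega

-- ===== VERDICT (by name: the statement is the Claim_ definition above) =====
theorem solution_spec : Claim_equal_solution := by
  intro arr n k _ hpre
  unfold Spec_solution solution solution_alt
  exact outer_eq n k arr.length arr 0 hpre le_rfl
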